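-- pv_equiv track=rewrite | github.com/sumanbanerjee1/GCN-SeA | code/preprocess_dstc2.py | locate_kb
-- ===== SOURCE A (Python) =====
-- def locate_kb(content):
--
--     kb_start_found = False
--     start_index = []
--     end_index = []
--     #kb_counter = count_kb
--
--     for turn_no, current_turn in enumerate(content):
--         if " r_post_code " in current_turn and not kb_start_found:
--             kb_start_found = True
--             start_index.append(turn_no)
--         if kb_start_found:
--             if "<silence>" in current_turn:
--                 end_index.append(turn_no)
--                 kb_start_found = False
--
--     start_index.append(len(content))
--     return start_index,end_index
-- ===== SOURCE B (Python) =====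
-- def locate_kb(content):
--     # Precompute the two index streams, then pair them with a two-pointer merge.
--     R = [i for i, t in enumerate(content) if " r_post_code " in t]
--     S = [i for i, t in enumerate(content) if "<silence>" in t]
--     start_index = []
--     end_index = []
--     rp = 0
--     sp = 0
--     while rp < len(R):
--         a = R[rp]
--         start_index.append(a)
--         while sp < len(S) and S[sp] < a:
--             sp += 1
--         if sp == len(S):
--             break
--         b = S[sp]
--         end_index.append(b)
--         sp += 1
--         while rp < len(R) and R[rp] <= b:
--             rp += 1
--     start_index.append(len(content))
--     return start_index, end_index
-- ===== Notes on version B (the rewrite author's own statement) =====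
-- stated objective: alternative
-- what changed: Replaces A's single-pass boolean flag machine with two precomputed index lists (r_post_code positions and <silence> positions) paired by a two-pointer merge.
import Mathlib
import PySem

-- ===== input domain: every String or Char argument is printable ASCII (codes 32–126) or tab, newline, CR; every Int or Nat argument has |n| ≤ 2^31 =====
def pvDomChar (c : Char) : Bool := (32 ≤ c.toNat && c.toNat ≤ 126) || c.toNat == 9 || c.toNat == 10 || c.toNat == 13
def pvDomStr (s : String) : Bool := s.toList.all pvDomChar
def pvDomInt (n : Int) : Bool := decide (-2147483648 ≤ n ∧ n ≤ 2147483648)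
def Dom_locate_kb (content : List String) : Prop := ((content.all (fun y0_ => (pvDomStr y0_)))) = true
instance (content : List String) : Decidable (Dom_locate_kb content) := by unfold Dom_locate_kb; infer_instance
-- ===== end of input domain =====

-- B replaces A's boolean flag machine by two precomputed index lists paired with a two-pointer merge (alternative decomposition, same cost).


-- ===== PORT A =====
-- the two substring tests both Pythons write literally
def hasR (s : String) : Bool := PySem.Str.isIn " r_post_code " s
def hasS (s : String) : Bool := PySem.Str.isIn "<silence>" s

-- one iteration of A's for-loop: state = (kb_start_found, start_index, end_index)
def kbStep (st : Bool × List Int × List Int) (p : Int × String) : Bool × List Int × List Int :=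
  let s1 := if hasR p.2 && !st.1 then (true, st.2.1 ++ [p.1]) else (st.1, st.2.1)
  if s1.1 && hasS p.2 then (false, s1.2, st.2.2 ++ [p.1]) else (s1.1, s1.2, st.2.2)

def locate_kb (content : List String) : List Int × List Int :=
  let r := (PySem.List.enumerate content 0).foldl kbStep (false, [], [])
  (r.2.1 ++ [(content.length : Int)], r.2.2)

-- ===== PORT B =====
-- two-pointer merge of the two index lists (pointer advances = dropWhile)
def kbMerge : List Int → List Int → List Int × List Int
  | [], _ => ([], [])
  | a :: rs, ss =>
    match ss.dropWhile (fun b => decide (b < a)) with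
    | [] => ([a], [])
    | b :: ss' =>
      let rs' := rs.dropWhile (fun x => decide (x ≤ b))
      let r := kbMerge rs' ss'
      (a :: r.1, b :: r.2)
termination_by rs _ => rs.length
decreasing_by
  simp only [List.length_cons]
  exact Nat.lt_succ_of_le (List.length_dropWhile_le _ _)

def locate_kb_alt (content : List String) : List Int × List Int :=
  let R := ((PySem.List.enumerate content 0).filter (fun p => hasR p.2)).map (fun p => p.1)
  let S := ((PySem.List.enumerate content 0).filter (fun p => hasS p.2)).map (fun p => p.1)
  let r := kbMerge R S
  (r.1 ++ [(content.length : Int)], r.2)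

-- ===== PRECONDITION & SPEC =====
def Spec_locate_kb (content : List String) (out : List Int × List Int) : Prop := out = locate_kb_alt content
instance (content : List String) (out : List Int × List Int) : Decidable (Spec_locate_kb content out) := by unfold Spec_locate_kb; infer_instance

-- ===== CLAIM (what is proved, stated in full; the proofs are below) =====
def Claim_equal_locate_kb : Prop := ∀ (content : List String), Dom_locate_kb content → Spec_locate_kb content (locate_kb content)

-- ===== LEMMAS AND PROOFS =====

-- cons-building recursive characterisation of A's loop
def aRec : List String → Int → Bool → List Int × List Int
  | [], _, _ => ([], [])
  | c :: cs, i, false =>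
      if hasR c then
        if hasS c then
          let r := aRec cs (i+1) false
          (i :: r.1, i :: r.2)
        else
          let r := aRec cs (i+1) true
          (i :: r.1, r.2)
      else aRec cs (i+1) false
  | c :: cs, i, true =>
      if hasS c then
        let r := aRec cs (i+1) false
        (r.1, i :: r.2)
      else aRec cs (i+1) true

def Ridx (cs : List String) (i : Int) : List Int :=
  ((PySem.List.enumerate cs i).filter (fun p => hasR p.2)).map (fun p => p.1)

def Sidx (cs : List String) (i : Int) : List Int :=
  ((PySem.List.enumerate cs i).filter (fun p => hasS p.2)).map (fun p => p.1)

-- the 'flag is up' continuation of the merge: close with the next silence, then merge on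
def closeThen (rs ss : List Int) : List Int × List Int :=
  match ss with
  | [] => ([], [])
  | b :: ss' =>
    let rs' := rs.dropWhile (fun x => decide (x ≤ b))
    let r := kbMerge rs' ss'
    (r.1, b :: r.2)

lemma Ridx_cons (c : String) (cs : List String) (i : Int) :
    Ridx (c :: cs) i = if hasR c then i :: Ridx cs (i+1) else Ridx cs (i+1) := by
  simp only [Ridx, PySem.List.enumerate_cons, List.filter_cons]
  by_cases h : hasR c <;> simp [h]

lemma Sidx_cons (c : String) (cs : List String) (i : Int) :
    Sidx (c :: cs) i = if hasS c then i :: Sidx cs (i+1) else Sidx cs (i+1) := by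
  simp only [Sidx, PySem.List.enumerate_cons, List.filter_cons]
  by_cases h : hasS c <;> simp [h]

lemma Ridx_ge (cs : List String) (i : Int) : ∀ x ∈ Ridx cs i, i ≤ x := by
  intro x hx
  simp only [Ridx, List.mem_map, List.mem_filter] at hx
  obtain ⟨p, ⟨hp, _⟩, rfl⟩ := hx
  obtain ⟨k, _, rfl⟩ := (PySem.List.mem_enumerate_iff _ _ _).1 hp
  simp

lemma Sidx_ge (cs : List String) (i : Int) : ∀ x ∈ Sidx cs i, i ≤ x := by
  intro x hx
  simp only [Sidx, List.mem_map, List.mem_filter] at hx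
  obtain ⟨p, ⟨hp, _⟩, rfl⟩ := hx
  obtain ⟨k, _, rfl⟩ := (PySem.List.mem_enumerate_iff _ _ _).1 hp
  simp

lemma dropWhile_eq_self_of_forall {α : Type} (p : α → Bool) (l : List α)
    (h : ∀ x ∈ l, p x = false) : l.dropWhile p = l := by
  cases l with
  | nil => rfl
  | cons a l => simp [h a (by simp)]

-- kbMerge only inspects its second argument through dropWhile (< head of first)
lemma kbMerge_drop_head (a i : Int) (rs ss : List Int) (h : i < a) :
    kbMerge (a :: rs) (i :: ss) = kbMerge (a :: rs) ss := by
  rw [kbMerge, kbMerge]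
  simp [h]

lemma closeThen_drop_head (b i : Int) (rs ss : List Int) (h : i ≤ b) :
    closeThen (i :: rs) (b :: ss) = closeThen rs (b :: ss) := by
  simp [closeThen, h]

-- main invariant: A's loop from index i equals the merge of the remaining index lists
lemma main_inv : ∀ (cs : List String) (i : Int),
    aRec cs i false = kbMerge (Ridx cs i) (Sidx cs i) ∧
    aRec cs i true = closeThen (Ridx cs i) (Sidx cs i) := by
  intro cs
  induction cs with
  | nil => intro i; constructor <;> simp [aRec, Ridx, Sidx, kbMerge, closeThen, PySem.List.enumerate_nil]
  | cons c cs ih =>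
    intro i
    have hR' : ∀ x ∈ Ridx cs (i+1), i + 1 ≤ x := Ridx_ge cs (i+1)
    have hS' : ∀ x ∈ Sidx cs (i+1), i + 1 ≤ x := Sidx_ge cs (i+1)
    have hdropS : (Sidx cs (i+1)).dropWhile (fun b => decide (b < i)) = Sidx cs (i+1) :=
      dropWhile_eq_self_of_forall _ _ (fun x hx => by have := hS' x hx; simp; omega)
    have hdropR : (Ridx cs (i+1)).dropWhile (fun x => decide (x ≤ i)) = Ridx cs (i+1) :=
      dropWhile_eq_self_of_forall _ _ (fun x hx => by have := hR' x hx; simp; omega)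
    obtain ⟨ihF, ihT⟩ := ih (i+1)
    constructor
    · -- flag = false
      rw [Ridx_cons, Sidx_cons]
      by_cases hr : hasR c
      · by_cases hs : hasS c
        · -- start and immediately close at i
          simp only [hr, hs, if_true]
          rw [kbMerge]
          simp [hdropR, aRec, hr, hs, ihF]
        · simp only [hr, hs, if_true, Bool.false_eq_true, if_false]
          rw [kbMerge, hdropS]
          cases hSx : Sidx cs (i+1) with
          | nil => simp [aRec, hr, hs, ihT, closeThen, hSx]
          | cons b ss' => simp [aRec, hr, hs, ihT, closeThen, hSx]
      · simp only [hr, Bool.false_eq_true, if_false]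
        by_cases hs : hasS c
        · simp only [hs, if_true]
          cases hRx : Ridx cs (i+1) with
          | nil => simp [aRec, hr, ihF, hRx, kbMerge]
          | cons a rs =>
            have ha : i < a := by
              have := hR' a (by rw [hRx]; exact List.mem_cons_self)
              omega
            rw [kbMerge_drop_head a i rs (Sidx cs (i+1)) ha, ← hRx]
            simp [aRec, hr, ihF]
        · simp [aRec, hr, hs, ihF]
    · -- flag = true
      rw [Ridx_cons, Sidx_cons]
      by_cases hs : hasS c
      · simp only [hs, if_true]
        have hdrop2 : ∀ l : List Int, (∀ x ∈ l, i + 1 ≤ x) →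
            ((if hasR c then i :: l else l).dropWhile (fun x => decide (x ≤ i))) = l := by
          intro l hl
          by_cases hr : hasR c
          · simp only [hr, if_true, List.dropWhile_cons]
            simp only [decide_eq_true_eq, le_refl, if_pos trivial]
            exact dropWhile_eq_self_of_forall _ _ (fun x hx => by have := hl x hx; simp; omega)
          · simp only [hr]
            exact dropWhile_eq_self_of_forall _ _ (fun x hx => by have := hl x hx; simp; omega)
        rw [closeThen]
        rw [hdrop2 _ hR']
        simp [aRec, hs, ihF]
      · simp only [hs, Bool.false_eq_true, if_false]
        cases hSx : Sidx cs (i+1) with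
        | nil =>
          by_cases hr : hasR c <;> simp [aRec, hs, ihT, closeThen, hSx]
        | cons b ss' =>
          by_cases hr : hasR c
          · have hb : i ≤ b := by
              have := hS' b (by rw [hSx]; exact List.mem_cons_self)
              omega
            rw [if_pos hr, closeThen_drop_head b i (Ridx cs (i+1)) ss' hb, ← hSx]
            simp [aRec, hs, ihT]
          · simp [aRec, hs, hr, ihT, hSx]

-- bridge: the foldl over enumerate with accumulators equals aRec
lemma foldl_bridge : ∀ (cs : List String) (i : Int) (flag : Bool) (starts ends : List Int),
    ((PySem.List.enumerate cs i).foldl kbStep (flag, starts, ends)).2 =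
      (starts ++ (aRec cs i flag).1, ends ++ (aRec cs i flag).2) := by
  intro cs
  induction cs with
  | nil => intro i flag starts ends; simp [PySem.List.enumerate_nil, aRec]
  | cons c cs ih =>
    intro i flag starts ends
    rw [PySem.List.enumerate_cons, List.foldl_cons]
    cases flag with
    | false =>
      by_cases hr : hasR c <;> by_cases hs : hasS c <;>
        simp [kbStep, hr, hs, aRec, ih]
    | true =>
      by_cases hs : hasS c <;>
        simp [kbStep, hs, aRec, ih]

-- ===== VERDICT (by name: the statement is the Claim_ definition above) =====
theorem locate_kb_spec : Claim_equal_locate_kb := by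
  intro content _
  unfold Spec_locate_kb locate_kb locate_kb_alt
  simp only [foldl_bridge content 0 false [] [], List.nil_append, (main_inv content 0).1]
  rfl
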